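-- pv_equiv track=rewrite | github.com/Williams392/Python_LoopGTP | upn_python/AgrupacionMontos.py | dispensadorDetallado
-- ===== SOURCE A (Python) =====
-- def dispensadorDetallado(monto):
--     lista = []
--     billetes = [200,100,50,20,10]
--     idx=0
--     while(monto>0 and idx < len(billetes)):
--         while(monto >= billetes[idx]):
--             monto = monto - billetes[idx]
--             lista.append(billetes[idx])
--         idx = idx + 1
--     return lista
-- ===== SOURCE B (Python) =====
-- def dispensadorDetallado(monto):
--     lista = []
--     for b in [200, 100, 50, 20, 10]:
--         if monto <= 0:
--             break
--         lista += [b] * (monto // b)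
--         monto %= b
--     return lista
-- ===== Notes on version B (the rewrite author's own statement) =====
-- stated objective: simpler
-- what changed: Replaces the nested while loops (repeated subtraction with one append per bill) by a single for over the denominations using closed-form division: count = monto // b, a bulk list extension, and monto %= b.
import Mathlib
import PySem

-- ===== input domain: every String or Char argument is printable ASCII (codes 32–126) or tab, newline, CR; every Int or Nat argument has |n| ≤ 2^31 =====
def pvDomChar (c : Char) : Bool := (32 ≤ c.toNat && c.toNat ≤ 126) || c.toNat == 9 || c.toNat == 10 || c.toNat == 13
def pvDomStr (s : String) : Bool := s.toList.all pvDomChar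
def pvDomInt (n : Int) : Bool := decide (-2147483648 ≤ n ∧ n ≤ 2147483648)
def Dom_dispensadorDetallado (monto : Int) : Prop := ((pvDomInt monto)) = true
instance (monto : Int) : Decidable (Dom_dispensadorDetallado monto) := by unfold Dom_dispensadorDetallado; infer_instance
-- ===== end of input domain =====

-- B replaces A's nested while loops (repeated subtraction, one append per bill) by a single
-- pass over the denominations using floor division and a bulk replicate (simpler).

-- ===== PORT A =====
-- the constant list 'billetes' of A
def pvBilletes : List Int := [200, 100, 50, 20, 10]

-- termination fact for the inner loop: every denomination is positive
theorem pvBilletes_pos : ∀ i (h : i < pvBilletes.length), 0 < pvBilletes.get ⟨i, h⟩ := by decide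

-- inner while loop of A: while monto >= b: monto -= b; lista.append(b)
-- (hb : 0 < b is a termination hypothesis; every element of billetes is positive)
def pvInnerA (b : Int) (hb : 0 < b) (monto : Int) (lista : List Int) : Int × List Int :=
  if _h : monto ≥ b then pvInnerA b hb (monto - b) (lista ++ [b]) else (monto, lista)
termination_by monto.toNat
decreasing_by omega

-- outer while loop of A over idx
def pvOuterA (monto : Int) (idx : Nat) (lista : List Int) : List Int :=
  if h : monto > 0 ∧ idx < pvBilletes.length then
    let b := pvBilletes.get ⟨idx, h.2⟩
    let r := pvInnerA b (pvBilletes_pos idx h.2) monto lista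
    pvOuterA r.1 (idx + 1) r.2
  else lista
termination_by pvBilletes.length - idx

def dispensadorDetallado (monto : Int) : List Int := pvOuterA monto 0 []

-- ===== PORT B =====
-- the for loop of B with break on monto <= 0; [b]*(monto//b) is List.replicate (count is ≥ 0
-- whenever it is reached, so .toNat is exact), monto %= b is PySem.Int.mod
def pvGoB (monto : Int) (bs : List Int) (lista : List Int) : List Int :=
  match bs with
  | [] => lista
  | b :: rest =>
      if monto ≤ 0 then lista
      else pvGoB (PySem.Int.mod monto b) rest
             (lista ++ List.replicate (PySem.Int.floordiv monto b).toNat b)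

def dispensadorDetallado_alt (monto : Int) : List Int := pvGoB monto [200, 100, 50, 20, 10] []

-- ===== PRECONDITION & SPEC =====
def Spec_dispensadorDetallado (monto : Int) (out : List Int) : Prop := out = dispensadorDetallado_alt monto
instance (monto : Int) (out : List Int) : Decidable (Spec_dispensadorDetallado monto out) := by unfold Spec_dispensadorDetallado; infer_instance

-- ===== CLAIM (what is proved, stated in full; the proofs are below) =====
def Claim_equal_dispensadorDetallado : Prop := ∀ (monto : Int), Dom_dispensadorDetallado monto → Spec_dispensadorDetallado monto (dispensadorDetallado monto)

-- ===== LEMMAS AND PROOFS =====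

-- A's inner loop computes the closed form: remainder and count-many copies of b appended
theorem pvInnerA_eq (b : Int) (hb : 0 < b) (monto : Int) (h0 : 0 ≤ monto) (lista : List Int) :
    pvInnerA b hb monto lista =
      (PySem.Int.mod monto b,
       lista ++ List.replicate (PySem.Int.floordiv monto b).toNat b) := by
  rw [PySem.Int.mod_eq_emod_of_pos hb, PySem.Int.floordiv_eq_ediv_of_pos hb]
  induction hk : monto.toNat using Nat.strong_induction_on generalizing monto lista with
  | _ k ih =>
    unfold pvInnerA
    split_ifs with h
    · rw [ih (monto - b).toNat (by omega) _ (by omega) _ rfl]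
      have h1 : (monto - b) % b = monto % b := by
        rw [Int.sub_emod, Int.emod_self, sub_zero, Int.emod_emod_of_dvd _ dvd_rfl]
      have h2 : (monto - b) / b = monto / b - 1 := by
        rw [show monto - b = monto + (-1) * b by ring, Int.add_mul_ediv_right _ _ (by omega)]; ring
      have h3 : 0 < monto / b := by
        have := (Int.le_ediv_iff_mul_le hb).mpr (by omega : 1 * b ≤ monto); omega
      rw [h1, h2]
      have h4 : (monto / b - 1).toNat + 1 = (monto / b).toNat := by omega
      simp only [List.append_assoc, List.singleton_append, ← h4, List.replicate_succ]
    · have h5 : monto / b = 0 := Int.ediv_eq_zero_of_lt h0 (by omega)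
      have h6 : monto % b = monto := Int.emod_eq_of_lt h0 (by omega)
      simp [h5, h6]

-- A's outer loop from index idx equals B's loop over the remaining denominations
theorem pvOuter_eq_go (idx : Nat) (hidx : idx ≤ pvBilletes.length) (monto : Int) (lista : List Int) :
    pvOuterA monto idx lista = pvGoB monto (pvBilletes.drop idx) lista := by
  induction hk : pvBilletes.length - idx generalizing idx monto lista with
  | zero =>
    have : idx = pvBilletes.length := by omega
    subst this
    unfold pvOuterA
    simp [pvGoB]
  | succ k ih =>
    have hlt : idx < pvBilletes.length := by omega
    unfold pvOuterA
    rcases le_or_gt monto 0 with hm | hm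
    · rw [dif_neg (by omega)]
      rw [List.drop_eq_getElem_cons hlt]
      simp [pvGoB, hm]
    · rw [dif_pos ⟨hm, hlt⟩]
      have hb := pvBilletes_pos idx hlt
      dsimp only
      rw [pvInnerA_eq _ _ monto (le_of_lt hm)]
      rw [ih (idx + 1) (by omega) _ _ (by omega)]
      rw [List.drop_eq_getElem_cons hlt]
      have hmod : 0 ≤ PySem.Int.mod monto (pvBilletes.get ⟨idx, hlt⟩) := by
        rw [PySem.Int.mod_eq_emod_of_pos hb]
        exact Int.emod_nonneg _ (by omega)
      simp [pvGoB, not_le.mpr hm, List.get_eq_getElem]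

-- ===== VERDICT (by name: the statement is the Claim_ definition above) =====
theorem dispensadorDetallado_spec : Claim_equal_dispensadorDetallado := by
  intro monto _
  unfold Spec_dispensadorDetallado dispensadorDetallado dispensadorDetallado_alt
  rw [pvOuter_eq_go 0 (by simp [pvBilletes])]
  rfl
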